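-- pv_equiv track=rewrite | github.com/amogorkon/ZVIC | src/zvic/compatibility.py | split_params
-- ===== SOURCE A (Python) =====
-- def split_params(params):
--     posonly = []
--     pos_or_kw = []
--     kwonly = []
--     for p in params:
--         kind = p.get("kind")
--         if kind == "POSITIONAL_ONLY":
--             posonly.append(p)
--         elif kind == "POSITIONAL_OR_KEYWORD":
--             pos_or_kw.append(p)
--         elif kind == "KEYWORD_ONLY":
--             kwonly.append(p)
--     return posonly, pos_or_kw, kwonly
-- ===== SOURCE B (Python) =====
-- def split_params(params):
--     rank = {"POSITIONAL_ONLY": 0, "POSITIONAL_OR_KEYWORD": 1, "KEYWORD_ONLY": 2}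
--     tagged = [(rank[p.get("kind")], p) for p in params if p.get("kind") in rank]
--     tagged.sort(key=lambda t: t[0])  # stable: original order kept within each kind
--     k0 = sum(1 for r, _ in tagged if r == 0)
--     k1 = sum(1 for r, _ in tagged if r < 2)
--     return ([p for _, p in tagged[:k0]],
--             [p for _, p in tagged[k0:k1]],
--             [p for _, p in tagged[k1:]])
-- ===== Notes on version B (the rewrite author's own statement) =====
-- stated objective: alternative
-- what changed: Replaces A's single classifying pass with three growing accumulators by a tag/stable-sort/slice pipeline: build (rank, param) pairs from a rank table, stable-sort them by rank, count the two cut points, and return the three slices.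
import Mathlib
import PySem

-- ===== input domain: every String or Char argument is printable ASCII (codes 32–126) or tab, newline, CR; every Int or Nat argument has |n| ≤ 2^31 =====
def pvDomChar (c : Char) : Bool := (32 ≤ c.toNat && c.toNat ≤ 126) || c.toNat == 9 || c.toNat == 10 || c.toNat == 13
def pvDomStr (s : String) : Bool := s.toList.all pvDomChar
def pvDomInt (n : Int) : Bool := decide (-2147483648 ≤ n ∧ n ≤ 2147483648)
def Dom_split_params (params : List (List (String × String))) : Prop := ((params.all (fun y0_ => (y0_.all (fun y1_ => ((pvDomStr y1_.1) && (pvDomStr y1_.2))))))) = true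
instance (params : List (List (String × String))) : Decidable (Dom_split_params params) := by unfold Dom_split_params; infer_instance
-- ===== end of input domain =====

-- B replaces A's one-pass three-accumulator partition by a tag / stable-sort / slice pipeline (alternative algorithm; return value identical).

-- ===== PORT A =====
-- single pass: three accumulators, appended to depending on p.get("kind")
def split_params (params : List (List (String × String))) : (List (List (String × String))) × (List (List (String × String))) × (List (List (String × String))) :=
  let st := params.foldl (fun (st : List (List (String × String)) × List (List (String × String)) × List (List (String × String))) p =>
    let kind := (PySem.Dict.ofList p).get? "kind"
    if kind = some "POSITIONAL_ONLY" then (st.1 ++ [p], st.2.1, st.2.2)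
    else if kind = some "POSITIONAL_OR_KEYWORD" then (st.1, st.2.1 ++ [p], st.2.2)
    else if kind = some "KEYWORD_ONLY" then (st.1, st.2.1, st.2.2 ++ [p])
    else st) ([], [], [])
  (st.1, st.2.1, st.2.2)

-- ===== PORT B =====
-- the literal rank table {"POSITIONAL_ONLY": 0, "POSITIONAL_OR_KEYWORD": 1, "KEYWORD_ONLY": 2}
def pvRank : PySem.Dict String Int :=
  PySem.Dict.ofList [("POSITIONAL_ONLY", 0), ("POSITIONAL_OR_KEYWORD", 1), ("KEYWORD_ONLY", 2)]

-- the comprehension body: (rank[p.get("kind")], p) if p.get("kind") in rank, else dropped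
def pvTag (p : List (String × String)) : Option (Int × List (String × String)) :=
  match (PySem.Dict.ofList p).get? "kind" with
  | some k => (pvRank.get? k).map (fun r => (r, p))
  | none => none

-- tag each kept param with its rank, stable-sort by rank, count the two cut points, return the three slices
def split_params_alt (params : List (List (String × String))) : (List (List (String × String))) × (List (List (String × String))) × (List (List (String × String))) :=
  let tagged := params.filterMap pvTag
  let ts := PySem.List.sorted tagged (fun t => t.1)
  let k0 : Int := ts.foldl (fun acc t => if t.1 == 0 then acc + 1 else acc) 0
  let k1 : Int := ts.foldl (fun acc t => if t.1 < 2 then acc + 1 else acc) 0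
  ((PySem.List.slice ts none (some k0)).map (fun t => t.2),
   (PySem.List.slice ts (some k0) (some k1)).map (fun t => t.2),
   (PySem.List.slice ts (some k1) none).map (fun t => t.2))

-- ===== PRECONDITION & SPEC =====
def Spec_split_params (params : List (List (String × String))) (out : (List (List (String × String))) × (List (List (String × String))) × (List (List (String × String)))) : Prop := out = split_params_alt params
instance (params : List (List (String × String))) (out : (List (List (String × String))) × (List (List (String × String))) × (List (List (String × String)))) : Decidable (Spec_split_params params out) := by unfold Spec_split_params; infer_instance

-- ===== CLAIM (what is proved, stated in full; the proofs are below) =====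
def Claim_equal_split_params : Prop := ∀ (params : List (List (String × String))), Dom_split_params params → Spec_split_params params (split_params params)

-- ===== LEMMAS AND PROOFS =====

-- proof-side abbreviation: p["kind"] == s
def pvKindIs (s : String) (p : List (String × String)) : Bool :=
  (PySem.Dict.ofList p).get? "kind" == some s

-- A's loop invariant: the fold extends each accumulator by the corresponding filter
theorem split_params_foldl_inv (params : List (List (String × String)))
    (a b c : List (List (String × String))) :
    params.foldl (fun (st : List (List (String × String)) × List (List (String × String)) × List (List (String × String))) p =>
      let kind := (PySem.Dict.ofList p).get? "kind"
      if kind = some "POSITIONAL_ONLY" then (st.1 ++ [p], st.2.1, st.2.2)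
      else if kind = some "POSITIONAL_OR_KEYWORD" then (st.1, st.2.1 ++ [p], st.2.2)
      else if kind = some "KEYWORD_ONLY" then (st.1, st.2.1, st.2.2 ++ [p])
      else st) (a, b, c)
    = (a ++ params.filter (pvKindIs "POSITIONAL_ONLY"),
       b ++ params.filter (pvKindIs "POSITIONAL_OR_KEYWORD"),
       c ++ params.filter (pvKindIs "KEYWORD_ONLY")) := by
  induction params generalizing a b c with
  | nil => simp
  | cons p ps ih =>
    simp only [List.foldl_cons, List.filter_cons, pvKindIs]
    by_cases h1 : (PySem.Dict.ofList p).get? "kind" = some "POSITIONAL_ONLY"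
    · simp [h1, ih]
    · by_cases h2 : (PySem.Dict.ofList p).get? "kind" = some "POSITIONAL_OR_KEYWORD"
      · simp [h2, ih]
      · by_cases h3 : (PySem.Dict.ofList p).get? "kind" = some "KEYWORD_ONLY"
        · simp [h3, ih]
        · simp [h1, h2, h3, ih]

-- the rank table as a literal, and its lookup as an if-chain
theorem pvRank_eq_mk : pvRank = PySem.Dict.mk [("POSITIONAL_ONLY",(0:Int)),("POSITIONAL_OR_KEYWORD",1),("KEYWORD_ONLY",2)] := by decide

theorem pvRank_get?_eq (k : String) :
    pvRank.get? k =
      (if k = "POSITIONAL_ONLY" then some 0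
       else if k = "POSITIONAL_OR_KEYWORD" then some 1
       else if k = "KEYWORD_ONLY" then some 2 else none) := by
  split_ifs with h1 h2 h3
  · subst h1; decide
  · subst h2; decide
  · subst h3; decide
  · rw [pvRank_eq_mk]
    simp only [PySem.Dict.get?_mk_cons, beq_iff_eq]
    rw [if_neg (fun h => h1 h.symm), if_neg (fun h => h2 h.symm), if_neg (fun h => h3 h.symm)]
    simp [PySem.Dict.get?]

-- the filter of the tagged list at rank c is the tagging of the corresponding kind-filter
theorem tagged_filter_eq (params : List (List (String × String))) (c : Int) (s : String)
    (hchar : ∀ k, pvRank.get? k = some c ↔ k = s) :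
    (params.filterMap pvTag).filter (fun t => t.1 == c)
      = (params.filter (pvKindIs s)).map (fun p => (c, p)) := by
  induction params with
  | nil => simp
  | cons p ps ih =>
    simp only [List.filterMap_cons, List.filter_cons]
    cases hk : (PySem.Dict.ofList p).get? "kind" with
    | none =>
      have hpt : pvTag p = none := by simp [pvTag, hk]
      have hkp : pvKindIs s p = false := by simp [pvKindIs, hk]
      simp [hpt, hkp, ih]
    | some k =>
      cases hv : pvRank.get? k with
      | none =>
        have hne : k ≠ s := by
          intro he; rw [he, (hchar s).mpr rfl] at hv; cases hv
        have hpt : pvTag p = none := by simp [pvTag, hk, hv]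
        have hkp : pvKindIs s p = false := by simp [pvKindIs, hk, hne]
        simp [hpt, hkp, ih]
      | some v =>
        have hpt : pvTag p = some (v, p) := by simp [pvTag, hk, hv]
        by_cases hvc : v = c
        · have hvv : pvRank.get? k = some c := by rw [hv, hvc]
          have hks : k = s := (hchar k).mp hvv
          have hkp : pvKindIs s p = true := by simp [pvKindIs, hk, hks]
          simp [hpt, hkp, hvc, ih]
        · have hks : k ≠ s := by
            intro he; rw [he, (hchar s).mpr rfl] at hv
            exact hvc (Option.some.inj hv).symm
          have hkp : pvKindIs s p = false := by simp [pvKindIs, hk, hks]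
          simp [hpt, hkp, hvc, ih]

-- every tag produced lies in {0,1,2}
theorem tagged_keys (params : List (List (String × String))) :
    ∀ t ∈ params.filterMap pvTag, t.1 = 0 ∨ t.1 = 1 ∨ t.1 = 2 := by
  intro t ht
  rcases List.mem_filterMap.mp ht with ⟨p, _, hp⟩
  cases hk : (PySem.Dict.ofList p).get? "kind" with
  | none =>
    have hpt : pvTag p = none := by simp [pvTag, hk]
    rw [hpt] at hp; cases hp
  | some k =>
    cases hv : pvRank.get? k with
    | none =>
      have hpt : pvTag p = none := by simp [pvTag, hk, hv]
      rw [hpt] at hp; cases hp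
    | some v =>
      have hpt : pvTag p = some (v, p) := by simp [pvTag, hk, hv]
      rw [hpt] at hp
      have hvt : t.1 = v := by rw [← Option.some.inj hp]
      rw [pvRank_get?_eq] at hv
      split_ifs at hv <;> simp_all

-- insertBy puts x in front when x goes before every element
theorem insertBy_all_before {α : Type} (before : α → α → Bool) (x : α) (zs : List α)
    (h : ∀ z ∈ zs, before x z = true) :
    PySem.List.insertBy before x zs = x :: zs := by
  cases zs with
  | nil => rfl
  | cons z t => simp [PySem.List.insertBy, h z (by simp)]

-- insertBy skips a prefix it does not go before
theorem insertBy_append {α : Type} (before : α → α → Bool) (x : α) (ys zs : List α)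
    (h : ∀ y ∈ ys, before x y = false) :
    PySem.List.insertBy before x (ys ++ zs) = ys ++ PySem.List.insertBy before x zs := by
  induction ys with
  | nil => simp
  | cons y t ih =>
    have hy : before x y = false := h y (by simp)
    simp [PySem.List.insertBy, hy, ih (fun z hz => h z (by simp [hz]))]

-- the stable-sort invariant: folding insertBy over keys in {0,1,2} keeps the three blocks
theorem sort_fold_inv (ts : List (Int × List (String × String)))
    (A0 A1 A2 : List (Int × List (String × String)))
    (h0 : ∀ t ∈ A0, t.1 = 0) (h1 : ∀ t ∈ A1, t.1 = 1) (h2 : ∀ t ∈ A2, t.1 = 2)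
    (hts : ∀ t ∈ ts, t.1 = 0 ∨ t.1 = 1 ∨ t.1 = 2) :
    ts.foldl (fun acc x => PySem.List.insertBy (fun a b => decide (a.1 < b.1)) x acc) (A0 ++ A1 ++ A2)
      = (A0 ++ ts.filter (fun t => t.1 == 0)) ++ (A1 ++ ts.filter (fun t => t.1 == 1))
        ++ (A2 ++ ts.filter (fun t => t.1 == 2)) := by
  induction ts generalizing A0 A1 A2 with
  | nil => simp
  | cons x tl ih =>
    have hx := hts x (by simp)
    have htl : ∀ t ∈ tl, t.1 = 0 ∨ t.1 = 1 ∨ t.1 = 2 := fun t ht => hts t (by simp [ht])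
    simp only [List.foldl_cons, List.filter_cons]
    rcases hx with hx | hx | hx
    · -- x goes at the end of A0
      have step : PySem.List.insertBy (fun a b => decide (a.1 < b.1)) x (A0 ++ A1 ++ A2)
          = (A0 ++ [x]) ++ A1 ++ A2 := by
        rw [List.append_assoc, insertBy_append _ _ _ _
          (fun y hy => by simp only [h0 y hy, hx]; decide),
          insertBy_all_before _ _ _
          (fun z hz => by
            rcases List.mem_append.mp hz with hz | hz
            · simp only [h1 z hz, hx]; decide
            · simp only [h2 z hz, hx]; decide)]
        simp
      rw [step, ih (A0 ++ [x]) A1 A2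
        (fun t ht => by rcases List.mem_append.mp ht with ht | ht
                        · exact h0 t ht
                        · simp at ht; subst ht; exact hx) h1 h2 htl]
      simp [hx]
    · -- x goes at the end of A1
      have step : PySem.List.insertBy (fun a b => decide (a.1 < b.1)) x (A0 ++ A1 ++ A2)
          = A0 ++ (A1 ++ [x]) ++ A2 := by
        rw [insertBy_append _ _ _ _
          (fun y hy => by
            rcases List.mem_append.mp hy with hy | hy
            · simp only [h0 y hy, hx]; decide
            · simp only [h1 y hy, hx]; decide),
          insertBy_all_before _ _ _
          (fun z hz => by simp only [h2 z hz, hx]; decide)]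
        simp
      rw [step, ih A0 (A1 ++ [x]) A2 h0
        (fun t ht => by rcases List.mem_append.mp ht with ht | ht
                        · exact h1 t ht
                        · simp at ht; subst ht; exact hx) h2 htl]
      simp [hx]
    · -- x goes at the very end
      have step : PySem.List.insertBy (fun a b => decide (a.1 < b.1)) x (A0 ++ A1 ++ A2)
          = A0 ++ A1 ++ (A2 ++ [x]) := by
        rw [PySem.List.insertBy_of_forall_not_before _ _ _
          (fun y hy => by
            rcases List.mem_append.mp hy with hy | hy
            · rcases List.mem_append.mp hy with hy | hy
              · simp only [h0 y hy, hx]; decide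
              · simp only [h1 y hy, hx]; decide
            · simp only [h2 y hy, hx]; decide)]
        simp
      rw [step, ih A0 A1 (A2 ++ [x]) h0 h1
        (fun t ht => by rcases List.mem_append.mp ht with ht | ht
                        · exact h2 t ht
                        · simp at ht; subst ht; exact hx) htl]
      simp [hx]

-- stable sort of a {0,1,2}-keyed list is the concatenation of its three key-filters
theorem sorted_three (ts : List (Int × List (String × String)))
    (hts : ∀ t ∈ ts, t.1 = 0 ∨ t.1 = 1 ∨ t.1 = 2) :
    PySem.List.sorted ts (fun t => t.1)
      = ts.filter (fun t => t.1 == 0) ++ ts.filter (fun t => t.1 == 1)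
        ++ ts.filter (fun t => t.1 == 2) := by
  have := sort_fold_inv ts [] [] [] (by simp) (by simp) (by simp) hts
  simpa [PySem.List.sorted_eq_foldl_insertBy] using this

-- ===== VERDICT (by name: the statement is the Claim_ definition above) =====
theorem split_params_spec : Claim_equal_split_params := by
  intro params _
  unfold Spec_split_params split_params split_params_alt
  have hchar0 : ∀ k, pvRank.get? k = some 0 ↔ k = "POSITIONAL_ONLY" := by
    intro k; rw [pvRank_get?_eq]; split_ifs <;> simp_all
  have hchar1 : ∀ k, pvRank.get? k = some 1 ↔ k = "POSITIONAL_OR_KEYWORD" := by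
    intro k; rw [pvRank_get?_eq]; split_ifs <;> simp_all
  have hchar2 : ∀ k, pvRank.get? k = some 2 ↔ k = "KEYWORD_ONLY" := by
    intro k; rw [pvRank_get?_eq]; split_ifs <;> simp_all
  simp only [split_params_foldl_inv,
    sorted_three (params.filterMap pvTag) (tagged_keys params),
    tagged_filter_eq params 0 "POSITIONAL_ONLY" hchar0,
    tagged_filter_eq params 1 "POSITIONAL_OR_KEYWORD" hchar1,
    tagged_filter_eq params 2 "KEYWORD_ONLY" hchar2,
    List.nil_append]
  set F0 := params.filter (pvKindIs "POSITIONAL_ONLY") with hF0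
  set F1 := params.filter (pvKindIs "POSITIONAL_OR_KEYWORD") with hF1
  set F2 := params.filter (pvKindIs "KEYWORD_ONLY") with hF2
  set M0 := F0.map (fun p => ((0 : Int), p)) with hM0
  set M1 := F1.map (fun p => ((1 : Int), p)) with hM1
  set M2 := F2.map (fun p => ((2 : Int), p)) with hM2
  have c0 : (M0 ++ M1 ++ M2).foldl (fun acc t => if t.1 == 0 then acc + 1 else acc) (0 : Int)
      = ((F0.length : Int)) := by
    rw [PySem.List.foldl_if_add_one]
    simp [hM0, hM1, hM2, List.countP_append, List.countP_map, Function.comp_def]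
  have c1 : (M0 ++ M1 ++ M2).foldl (fun acc t => if t.1 < 2 then acc + 1 else acc) (0 : Int)
      = (((F0.length + F1.length : Nat) : Int)) := by
    rw [PySem.List.foldl_ite_add_one]
    simp [hM0, hM1, hM2, List.countP_append, List.countP_map, Function.comp_def]
  have t0 : (M0 ++ M1 ++ M2).take F0.length = M0 := by
    rw [List.append_assoc]; exact List.take_left' (by simp [hM0])
  have d0 : (M0 ++ M1 ++ M2).drop F0.length = M1 ++ M2 := by
    rw [List.append_assoc]; exact List.drop_left' (by simp [hM0])
  have t1 : (M1 ++ M2).take F1.length = M1 := List.take_left' (by simp [hM1])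
  have d1 : (M0 ++ M1 ++ M2).drop (F0.length + F1.length) = M2 :=
    List.drop_left' (by simp [hM0, hM1])
  rw [c0, c1, PySem.List.slice_to_natCast, PySem.List.slice_natCast,
    PySem.List.slice_from_natCast, t0, d0, Nat.add_sub_cancel_left, t1, d1]
  simp [hM0, hM1, hM2, List.map_map, Function.comp_def]
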